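-- pv_equiv track=rewrite | github.com/dataelement/bisheng-unstructured | src/bisheng_unstructured/documents/pdf_parser/idp/pdf.py | find_max_continuous_seq
-- ===== SOURCE A (Python) =====
-- def find_max_continuous_seq(arr):
--     n = len(arr)
--     max_info = (0, 1)
--     for i in range(n):
--         m = 1
--         for j in range(i + 1, n):
--             if arr[j] - arr[j - 1] == 1:
--                 m += 1
--             else:
--                 break
--
--         if m > max_info[1]:
--             max_info = (i, m)
--
--     max_info = (max_info[0] + arr[0], max_info[1])
--     return max_info
-- ===== SOURCE B (Python) =====
-- def find_max_continuous_seq(arr):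
--     best_start, best_len = 0, 1
--     cur_start, cur_len = 0, 1
--     for j in range(1, len(arr)):
--         if arr[j] - arr[j - 1] == 1:
--             cur_len += 1
--         else:
--             cur_start, cur_len = j, 1
--         if cur_len > best_len:
--             best_start, best_len = cur_start, cur_len
--     return (best_start + arr[0], best_len)
-- ===== Notes on version B (the rewrite author's own statement) =====
-- stated objective: faster
-- what changed: Replaces the quadratic scan that recomputes each run length from every index with a single linear pass that maintains the current run's start and length and updates the best on strict improvement.
import Mathlib
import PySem

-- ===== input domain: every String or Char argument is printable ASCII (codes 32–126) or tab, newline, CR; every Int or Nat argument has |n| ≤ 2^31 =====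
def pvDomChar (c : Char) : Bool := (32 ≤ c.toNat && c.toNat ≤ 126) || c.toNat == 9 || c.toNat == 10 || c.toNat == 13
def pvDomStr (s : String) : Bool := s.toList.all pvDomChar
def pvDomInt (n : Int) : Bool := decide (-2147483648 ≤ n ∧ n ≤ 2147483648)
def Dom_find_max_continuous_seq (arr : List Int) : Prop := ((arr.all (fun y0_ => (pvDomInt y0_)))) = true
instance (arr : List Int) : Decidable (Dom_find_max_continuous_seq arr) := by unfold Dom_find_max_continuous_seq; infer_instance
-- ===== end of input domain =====

-- B replaces A's quadratic rescan of every run with one linear pass keeping the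
-- current run's start/length and updating the best on strict improvement.

-- ===== PORT A =====
-- inner loop 'for j in range(i+1, n): if arr[j]-arr[j-1]==1: m += 1 else: break'
-- (indices j, j-1 are always in range here, so plain getD is exact)
def innerA (arr : List Int) (j m : Nat) : Nat :=
  if h : j < arr.length then
    if arr.getD j 0 - arr.getD (j - 1) 0 = 1 then innerA arr (j + 1) (m + 1) else m
  else m
termination_by arr.length - j
decreasing_by omega

def find_max_continuous_seq (arr : List Int) : Int × Int :=
  let n := arr.length
  let max_info : Int × Int :=
    (List.range n).foldl
      (fun (mi : Int × Int) i =>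
        let m := innerA arr (i + 1) 1
        if (m : Int) > mi.2 then ((i : Int), (m : Int)) else mi)
      (0, 1)
  (max_info.1 + arr.getD 0 0, max_info.2)

-- ===== PORT B =====
-- state is (best_start, best_len, cur_start, cur_len); one step per j in range(1, len(arr))
def stepB (arr : List Int) (s : Int × Int × Int × Int) (j : Nat) : Int × Int × Int × Int :=
  let cs := if arr.getD j 0 - arr.getD (j - 1) 0 = 1 then s.2.2.1 else (j : Int)
  let cl := if arr.getD j 0 - arr.getD (j - 1) 0 = 1 then s.2.2.2 + 1 else 1
  if cl > s.2.1 then (cs, cl, cs, cl) else (s.1, s.2.1, cs, cl)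

def find_max_continuous_seq_alt (arr : List Int) : Int × Int :=
  let s := (List.range' 1 (arr.length - 1)).foldl (stepB arr) (0, 1, 0, 1)
  (s.1 + arr.getD 0 0, s.2.1)

-- ===== PRECONDITION & SPEC =====
-- Pre_ excludes only the empty list, on which Python A raises IndexError reading the first element.
def Pre_find_max_continuous_seq (arr : List Int) : Prop := arr ≠ []
instance (arr : List Int) : Decidable (Pre_find_max_continuous_seq arr) := by
  unfold Pre_find_max_continuous_seq; infer_instance

def pvWitness_find_max_continuous_seq : List Int := [3, 4, 5, 9]

def Spec_find_max_continuous_seq (arr : List Int) (out : Int × Int) : Prop := out = find_max_continuous_seq_alt arr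
instance (arr : List Int) (out : Int × Int) : Decidable (Spec_find_max_continuous_seq arr out) := by unfold Spec_find_max_continuous_seq; infer_instance

-- ===== CLAIM (what is proved, stated in full; the proofs are below) =====
def Claim_equal_find_max_continuous_seq : Prop := ∀ (arr : List Int), Dom_find_max_continuous_seq arr → Pre_find_max_continuous_seq arr → Spec_find_max_continuous_seq arr (find_max_continuous_seq arr)

-- ===== LEMMAS AND PROOFS =====

-- length of the chain of consecutive (+1) differences starting at index j
def runFrom (arr : List Int) (j : Nat) : Nat :=
  if h : j < arr.length then
    if arr.getD j 0 - arr.getD (j - 1) 0 = 1 then runFrom arr (j + 1) + 1 else 0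
  else 0
termination_by arr.length - j
decreasing_by omega

-- A's run length from start index i
def rA (arr : List Int) (i : Nat) : Nat := 1 + runFrom arr (i + 1)

-- generic strict-greater argmax fold (A's outer loop shape)
def argmaxF (v : Nat → Nat) (l : List Nat) (s : Int × Int) : Int × Int :=
  l.foldl (fun mi i => if (v i : Int) > mi.2 then ((i : Int), (v i : Int)) else mi) s

-- run length truncated at position k (what B can know after reading arr[0..k])
def vtr (arr : List Int) (k i : Nat) : Nat := min (rA arr i) (k + 1 - i)

-- B's loop invariant after processing j = 1..k
def InvB (arr : List Int) (k : Nat) (s : Int × Int × Int × Int) : Prop :=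
  ∃ c : Nat, c ≤ k ∧
    (c = 0 ∨ ¬ (arr.getD c 0 - arr.getD (c - 1) 0 = 1)) ∧
    (∀ t, c < t → t ≤ k → arr.getD t 0 - arr.getD (t - 1) 0 = 1) ∧
    s.2.2.1 = (c : Int) ∧ s.2.2.2 = ((k + 1 - c : Nat) : Int) ∧
    (s.1, s.2.1) = argmaxF (vtr arr k) (List.range (k + 1)) (0, 1)

theorem innerA_eq (arr : List Int) (j m : Nat) : innerA arr j m = m + runFrom arr j := by
  fun_induction innerA arr j m with
  | case1 j m h hd ih => rw [runFrom, dif_pos h, if_pos hd, ih]; omega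
  | case2 j m h hd => rw [runFrom, dif_pos h, if_neg hd]; omega
  | case3 j m h => rw [runFrom, dif_neg h]; omega

theorem runFrom_le (arr : List Int) (e : Nat)
    (he : arr.length ≤ e ∨ ¬ (arr.getD e 0 - arr.getD (e - 1) 0 = 1)) :
    ∀ j, j ≤ e → runFrom arr j ≤ e - j := by
  intro j hj
  induction hd : e - j generalizing j with
  | zero =>
    have hje : j = e := by omega
    subst hje
    rw [runFrom]
    rcases he with he | he
    · rw [dif_neg (by omega)]
    · by_cases h : j < arr.length
      · rw [dif_pos h, if_neg he]
      · rw [dif_neg h]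
  | succ d ih =>
    rw [runFrom]
    by_cases h : j < arr.length
    · rw [dif_pos h]
      by_cases hdd : arr.getD j 0 - arr.getD (j - 1) 0 = 1
      · rw [if_pos hdd]
        have := ih (j + 1) (by omega) (by omega)
        omega
      · rw [if_neg hdd]; omega
    · rw [dif_neg h]; omega

theorem runFrom_ge (arr : List Int) (e : Nat) (he : e ≤ arr.length) :
    ∀ j, (∀ t, j ≤ t → t < e → arr.getD t 0 - arr.getD (t - 1) 0 = 1) →
      e - j ≤ runFrom arr j := by
  intro j hdiff
  induction hd : e - j generalizing j with
  | zero => omega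
  | succ d ih =>
    rw [runFrom, dif_pos (by omega), if_pos (hdiff j (le_refl j) (by omega))]
    have := ih (j + 1) (fun t ht1 ht2 => hdiff t (by omega) ht2) (by omega)
    omega

theorem argmaxF_append (v : Nat → Nat) (l1 l2 : List Nat) (s : Int × Int) :
    argmaxF v (l1 ++ l2) s = argmaxF v l2 (argmaxF v l1 s) := List.foldl_append ..

theorem argmaxF_congr (v w : Nat → Nat) (l : List Nat) (s : Int × Int)
    (h : ∀ i ∈ l, v i = w i) : argmaxF v l s = argmaxF w l s := by
  induction l generalizing s with
  | nil => rfl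
  | cons a l ih =>
    unfold argmaxF
    simp only [List.foldl_cons]
    rw [h a (by simp)]
    exact ih _ (fun i hi => h i (by simp [hi]))

theorem argmaxF_snd_ge (v : Nat → Nat) (l : List Nat) (s : Int × Int) :
    s.2 ≤ (argmaxF v l s).2 := by
  induction l generalizing s with
  | nil => simp [argmaxF]
  | cons a l ih =>
    unfold argmaxF
    simp only [List.foldl_cons]
    by_cases h : (v a : Int) > s.2
    · rw [if_pos h]
      exact le_trans (le_of_lt h) (ih _)
    · rw [if_neg h]; exact ih s

theorem argmaxF_noup (v : Nat → Nat) (l : List Nat) (s : Int × Int)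
    (h : ∀ i ∈ l, (v i : Int) ≤ s.2) : argmaxF v l s = s := by
  induction l with
  | nil => rfl
  | cons a l ih =>
    unfold argmaxF
    simp only [List.foldl_cons]
    rw [if_neg (by exact not_lt.mpr (h a (by simp)))]
    exact ih (fun i hi => h i (by simp [hi]))

theorem argmaxF_seg (v : Nat → Nat) (a b K : Nat) (s : Int × Int) (hb : 0 < b)
    (hv : ∀ t, t < b → v (a + t) = K - t) :
    argmaxF v (List.range' a b) s = if (K : Int) > s.2 then ((a : Int), (K : Int)) else s := by
  obtain ⟨b', rfl⟩ : ∃ b', b = b' + 1 := ⟨b - 1, by omega⟩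
  rw [List.range'_succ]
  have hva : v a = K := by have := hv 0 (by omega); simpa using this
  unfold argmaxF
  simp only [List.foldl_cons, hva]
  have hrest : ∀ st : Int × Int, (K:Int) ≤ st.2 →
      List.foldl (fun mi i => if (v i : Int) > mi.2 then ((i:Int), (v i : Int)) else mi) st (List.range' (a + 1) b') = st := by
    intro st hst
    refine argmaxF_noup v _ _ ?_
    intro i hi
    rw [List.mem_range'_1] at hi
    obtain ⟨h1, h2⟩ := hi
    have ht : v i = K - (i - a) := by
      have := hv (i - a) (by omega)
      rw [show a + (i - a) = i by omega] at this
      exact this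
    calc ((v i : Nat) : Int) ≤ (K : Int) := by rw [ht]; exact_mod_cast Nat.cast_le.mpr (Nat.sub_le _ _)
      _ ≤ st.2 := hst
  by_cases h : (K : Int) > s.2
  · rw [if_pos h]
    exact hrest _ (le_refl _)
  · rw [if_neg h]
    exact hrest _ ((by omega))

theorem step_comp (s : Int × Int) (a : Int) (K : Nat) :
    (let s' := if (K : Int) > s.2 then (a, (K : Int)) else s
     if ((K + 1 : Nat) : Int) > s'.2 then (a, ((K + 1 : Nat) : Int)) else s') =
    if ((K + 1 : Nat) : Int) > s.2 then (a, ((K + 1 : Nat) : Int)) else s := by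
  dsimp only
  push_cast
  split_ifs with h1 h2 h3 <;> first | rfl | (exfalso; omega)

theorem inv_base (arr : List Int) : InvB arr 0 (0, 1, 0, 1) := by
  refine ⟨0, le_refl 0, Or.inl rfl, fun t ht1 ht2 => by omega, rfl, rfl, ?_⟩
  have hv : vtr arr 0 0 = 1 := by unfold vtr rA; omega
  show (0, 1) = argmaxF (vtr arr 0) [0] (0, 1)
  unfold argmaxF
  simp [hv]

theorem inv_step (arr : List Int) (k : Nat) (s : Int × Int × Int × Int)
    (hk : k + 1 < arr.length) (h : InvB arr k s) : InvB arr (k + 1) (stepB arr s (k + 1)) := by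
  obtain ⟨c, hck, hcs, hrun, he1, he2, hbest⟩ := h
  by_cases hD : arr.getD (k + 1) 0 - arr.getD (k + 1 - 1) 0 = 1
  · -- the run extends through k+1
    -- values of the truncated run lengths on the prefix [0, c)
    have hpre : ∀ i ∈ List.range' 0 c, vtr arr (k + 1) i = vtr arr k i := by
      intro i hi
      rw [List.mem_range'_1] at hi
      have hic : i < c := by omega
      have hb : runFrom arr (i + 1) ≤ c - (i + 1) := by
        rcases hcs with hc0 | hcns
        · omega
        · exact runFrom_le arr c (Or.inr hcns) (i + 1) (by omega)
      unfold vtr rA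
      omega
    -- on [c, k+2) the truncated run length is (k+2-c) - t
    have hseg1 : ∀ t, t < k + 2 - c → vtr arr (k + 1) (c + t) = (k + 2 - c) - t := by
      intro t ht
      have hge : k + 2 - (c + t + 1) ≤ runFrom arr (c + t + 1) := by
        refine runFrom_ge arr (k + 2) (by omega) (c + t + 1) ?_
        intro u hu1 hu2
        rcases Nat.lt_or_ge u (k + 1) with hu | hu
        · exact hrun u (by omega) (by omega)
        · have : u = k + 1 := by omega
          subst this; exact hD
      unfold vtr rA
      omega
    have hseg0 : ∀ t, t < k + 1 - c → vtr arr k (c + t) = (k + 1 - c) - t := by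
      intro t ht
      have hge : k + 1 - (c + t + 1) ≤ runFrom arr (c + t + 1) := by
        refine runFrom_ge arr (k + 1) (by omega) (c + t + 1) ?_
        intro u hu1 hu2
        exact hrun u (by omega) (by omega)
      unfold vtr rA
      omega
    -- decompose both argmax folds at c
    have hsplit1 : List.range (k + 2) = List.range' 0 c ++ List.range' c (k + 2 - c) := by
      have h := List.range'_append (s := 0) (m := c) (n := k + 2 - c) (step := 1)
      simp only [zero_add, one_mul] at h
      rw [show c + (k + 2 - c) = k + 2 by omega] at h
      exact List.range_eq_range'.trans h.symm
    have hsplit0 : List.range (k + 1) = List.range' 0 c ++ List.range' c (k + 1 - c) := by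
      have h := List.range'_append (s := 0) (m := c) (n := k + 1 - c) (step := 1)
      simp only [zero_add, one_mul] at h
      rw [show c + (k + 1 - c) = k + 1 by omega] at h
      exact List.range_eq_range'.trans h.symm
    have hS : argmaxF (vtr arr (k + 1)) (List.range' 0 c) (0, 1) =
        argmaxF (vtr arr k) (List.range' 0 c) (0, 1) := argmaxF_congr _ _ _ _ hpre
    have hA1 : argmaxF (vtr arr (k + 1)) (List.range (k + 2)) (0, 1) =
        (if ((k + 2 - c : Nat) : Int) > (argmaxF (vtr arr k) (List.range' 0 c) (0, 1)).2
         then ((c : Int), ((k + 2 - c : Nat) : Int)) else argmaxF (vtr arr k) (List.range' 0 c) (0, 1)) := by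
      rw [hsplit1, argmaxF_append, hS]
      exact argmaxF_seg _ c _ _ _ (by omega) hseg1
    have hA0 : (s.1, s.2.1) =
        (if ((k + 1 - c : Nat) : Int) > (argmaxF (vtr arr k) (List.range' 0 c) (0, 1)).2
         then ((c : Int), ((k + 1 - c : Nat) : Int)) else argmaxF (vtr arr k) (List.range' 0 c) (0, 1)) := by
      rw [hbest, hsplit0, argmaxF_append]
      exact argmaxF_seg _ c _ _ _ (by omega) hseg0
    refine ⟨c, by omega, hcs, ?_, ?_, ?_, ?_⟩
    · intro t ht1 ht2
      rcases Nat.lt_or_ge t (k + 1) with htk | htk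
      · exact hrun t ht1 (by omega)
      · have : t = k + 1 := by omega
        subst this; exact hD
    · simp only [stepB, if_pos hD]
      split_ifs <;> simp [he1]
    · simp only [stepB, if_pos hD]
      split_ifs <;> · simp only; rw [he2]; omega
    · -- the best pair
      have hKe : ((k + 2 - c : Nat) : Int) = (((k + 1 - c) + 1 : Nat) : Int) := by push_cast; omega
      have hcomp := step_comp (argmaxF (vtr arr k) (List.range' 0 c) (0, 1)) (c : Int) (k + 1 - c)
      simp only at hcomp
      simp only [stepB, if_pos hD]
      rw [hA1, hKe, ← hcomp, ← hA0]
      have hcl : s.2.2.2 + 1 = (((k + 1 - c) + 1 : Nat) : Int) := by rw [he2]; push_cast; omega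
      split_ifs with h1 h2 h2 <;>
        first
        | · simp only; rw [he1, hcl]
        | · exfalso; rw [hcl] at h1; exact (by omega : False)
        | rfl
  · -- the run breaks at k+1: current run restarts, best unchanged
    have hle : ∀ i, i < k + 1 → rA arr i ≤ k + 1 - i := by
      intro i hi
      have := runFrom_le arr (k + 1) (Or.inr hD) (i + 1) (by omega)
      unfold rA
      omega
    have hsame : ∀ i ∈ List.range (k + 1), vtr arr (k + 1) i = vtr arr k i := by
      intro i hi
      rw [List.mem_range] at hi
      have := hle i hi
      unfold vtr
      omega
    have hS2 : (1 : Int) ≤ (argmaxF (vtr arr k) (List.range (k + 1)) (0, 1)).2 :=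
      argmaxF_snd_ge _ _ _
    have hnogt : ¬ ((1 : Int) > s.2.1) := by rw [show s.2.1 = (s.1, s.2.1).2 from rfl, hbest]; omega
    have hbest1 : argmaxF (vtr arr (k + 1)) (List.range (k + 2)) (0, 1) =
        argmaxF (vtr arr k) (List.range (k + 1)) (0, 1) := by
      rw [List.range_succ, argmaxF_append, argmaxF_congr _ _ _ _ hsame]
      refine argmaxF_noup _ _ _ ?_
      intro i hi
      rw [List.mem_singleton] at hi
      subst hi
      have : vtr arr (k + 1) (k + 1) ≤ 1 := by unfold vtr; omega
      calc ((vtr arr (k + 1) (k + 1) : Nat) : Int) ≤ (1 : Int) := by exact_mod_cast this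
        _ ≤ _ := hS2
    refine ⟨k + 1, le_refl _, Or.inr hD, fun t ht1 ht2 => by omega, ?_, ?_, ?_⟩ <;>
      simp only [stepB, if_neg hD, if_neg hnogt]
    · simp
    · rw [hbest1, ← hbest]

theorem inv_all (arr : List Int) : ∀ k, k ≤ arr.length - 1 → 0 < arr.length →
    InvB arr k ((List.range' 1 k).foldl (stepB arr) (0, 1, 0, 1)) := by
  intro k
  induction k with
  | zero => intro _ _; exact inv_base arr
  | succ k ih =>
    intro hk hn
    rw [List.range'_concat, List.foldl_append]
    simp only [List.foldl_cons, List.foldl_nil]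
    rw [show 1 + 1 * k = k + 1 by omega]
    exact inv_step arr k _ (by omega) (ih (by omega) hn)

-- ===== VERDICT (by name: the statement is the Claim_ definition above) =====
theorem find_max_continuous_seq_spec : Claim_equal_find_max_continuous_seq := by
  intro arr _ hpre
  unfold Spec_find_max_continuous_seq
  have hn : 0 < arr.length := List.length_pos_iff.mpr hpre
  obtain ⟨c, _, _, _, _, _, hbest⟩ := inv_all arr (arr.length - 1) (le_refl _) hn
  rw [show arr.length - 1 + 1 = arr.length by omega] at hbest
  have hA : find_max_continuous_seq arr =
      ((argmaxF (fun i => innerA arr (i + 1) 1) (List.range arr.length) (0, 1)).1 + arr.getD 0 0,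
       (argmaxF (fun i => innerA arr (i + 1) 1) (List.range arr.length) (0, 1)).2) := rfl
  rw [hA]
  have h1 : argmaxF (fun i => innerA arr (i + 1) 1) (List.range arr.length) (0, 1) =
      argmaxF (rA arr) (List.range arr.length) (0, 1) :=
    argmaxF_congr _ _ _ _ (fun i _ => by rw [innerA_eq]; rfl)
  have h2 : argmaxF (rA arr) (List.range arr.length) (0, 1) =
      argmaxF (vtr arr (arr.length - 1)) (List.range arr.length) (0, 1) := by
    refine (argmaxF_congr _ _ _ _ ?_).symm
    intro i hi
    rw [List.mem_range] at hi
    have := runFrom_le arr arr.length (Or.inl (le_refl _)) (i + 1) (by omega)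
    unfold vtr rA
    omega
  rw [h1, h2, ← hbest]
  rfl
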